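-- pv_equiv track=rewrite | github.com/pypi-data/pypi-mirror-276 | packages/CtqKit/ctqkit-0.1.8-py3-none-any.whl/CtqKit/platform.py | readout_data_to_state_probabilities
-- ===== SOURCE A (Python) =====
-- def readout_data_to_state_probabilities(
--
--         result
-- ):
--     state01 = result.get('samples')
--     basis_list = []
--     basis_content = ''.join([''.join([str(s) for s in state]) for state in state01[1:]])
--     qubits_num = len(state01[0])  # 测量比特个数
--     for idx in range(qubits_num):
--         basis_result = basis_content[idx: len(basis_content): qubits_num]
--         basis_list.append([True if res == "1" else False for res in basis_result])
--     return basis_list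
-- ===== SOURCE B (Python) =====
-- def readout_data_to_state_probabilities(
--
--         result
-- ):
--     state01 = result.get('samples')
--     qubits_num = len(state01[0])
--     basis_list = [[] for _ in range(qubits_num)]
--     if qubits_num:
--         i = 0
--         for state in state01[1:]:
--             for s in state:
--                 for ch in str(s):
--                     basis_list[i % qubits_num].append(ch == '1')
--                     i += 1
--     return basis_list
-- ===== Notes on version B (the rewrite author's own statement) =====
-- stated objective: alternative
-- what changed: Instead of flattening all samples into one big string and extracting each qubit column with a strided slice per qubit, B allocates the qubit columns up front and makes a single pass over the sample digits, scattering each character into column i % qubits_num.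
-- outside the precondition, e.g. on readout_data_to_state_probabilities({}): A raises TypeError, B raises TypeError; on readout_data_to_state_probabilities({'samples': []}): A raises IndexError, B raises IndexError
import Mathlib
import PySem

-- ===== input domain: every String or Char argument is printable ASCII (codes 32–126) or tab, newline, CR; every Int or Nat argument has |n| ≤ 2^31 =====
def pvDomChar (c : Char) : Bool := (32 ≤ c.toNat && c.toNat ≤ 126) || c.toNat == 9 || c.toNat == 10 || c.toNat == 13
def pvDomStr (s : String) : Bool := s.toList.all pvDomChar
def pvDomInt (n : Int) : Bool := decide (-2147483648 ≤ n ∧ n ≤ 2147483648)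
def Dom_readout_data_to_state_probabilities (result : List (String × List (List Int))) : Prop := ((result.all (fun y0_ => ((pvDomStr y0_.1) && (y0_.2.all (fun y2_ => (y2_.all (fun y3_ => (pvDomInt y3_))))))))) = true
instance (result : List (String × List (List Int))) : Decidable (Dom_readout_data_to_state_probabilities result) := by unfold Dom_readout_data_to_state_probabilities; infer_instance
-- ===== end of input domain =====

-- B replaces A's flatten-into-one-string + one strided slice per qubit by a single
-- scatter pass over the sample digits into preallocated per-qubit columns (alternative decomposition, same output).


-- ===== PORT A =====
def readout_data_to_state_probabilities (result : List (String × List (List Int))) : List (List Bool) :=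
  match PySem.Dict.get? (PySem.Dict.mk result) "samples" with
  | none => []          -- Python: result.get returns None, None[1:] raises TypeError; excluded by Pre_
  | some state01 =>
    match PySem.List.pyGet? state01 0 with
    | none => []        -- Python: state01[0] raises IndexError on empty samples; excluded by Pre_
    | some first =>
      -- ''.join([''.join([str(s) for s in state]) for state in state01[1:]]) kept as a char list
      let basis_content : List Char :=
        ((PySem.List.slice state01 (some 1) none).map
          (fun state => (state.map (fun s => PySem.Int.toChars s)).flatten)).flatten
      let qubits_num : Int := (first.length : Int)
      (PySem.List.pyRange 0 qubits_num 1).foldl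
        (fun basis_list idx =>
          let basis_result :=
            match PySem.List.slice? basis_content (some idx) (some (basis_content.length : Int)) qubits_num with
            | none => []   -- unreachable inside the loop: idx ∈ range(qubits_num) forces qubits_num ≠ 0
            | some bs => bs
          basis_list ++ [basis_result.map (fun res => if res = '1' then true else false)]) []

-- ===== PORT B =====
def readout_data_to_state_probabilities_alt (result : List (String × List (List Int))) : List (List Bool) :=
  match PySem.Dict.get? (PySem.Dict.mk result) "samples" with
  | none => []          -- same TypeError input, excluded by Pre_
  | some state01 =>
    match PySem.List.pyGet? state01 0 with
    | none => []        -- same IndexError input, excluded by Pre_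
    | some first =>
      let q := first.length
      let basis_list : List (List Bool) := List.replicate q []
      if q = 0 then basis_list
      else
        (state01.tail.foldl
          (fun acc state =>
            state.foldl
              (fun acc2 s =>
                (PySem.Int.toChars s).foldl
                  (fun (st : List (List Bool) × Nat) ch =>
                    -- i % qubits_num: both operands are nonnegative Nats, so Nat `%` is exactly Python's `%` here
                    (st.1.modify (st.2 % q) (fun col => col ++ [ch == '1']), st.2 + 1))
                  acc2)
              acc)
          (basis_list, 0)).1

-- ===== PRECONDITION & SPEC =====
-- Pre_ excludes exactly the inputs where Python A raises: a missing 'samples' key (TypeError on None[1:])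
-- and an empty samples list (IndexError on state01[0]); Python B raises on the same inputs.
def Pre_readout_data_to_state_probabilities (result : List (String × List (List Int))) : Prop :=
  (PySem.Dict.get? (PySem.Dict.mk result) "samples").getD [] ≠ []
instance (result : List (String × List (List Int))) : Decidable (Pre_readout_data_to_state_probabilities result) := by unfold Pre_readout_data_to_state_probabilities; infer_instance

def pvWitness_readout_data_to_state_probabilities : (List (String × List (List Int))) :=
  [("samples", [[0, 1], [1, 0], [1, 1]])]

def Spec_readout_data_to_state_probabilities (result : List (String × List (List Int))) (out : List (List Bool)) : Prop := out = readout_data_to_state_probabilities_alt result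
instance (result : List (String × List (List Int))) (out : List (List Bool)) : Decidable (Spec_readout_data_to_state_probabilities result out) := by unfold Spec_readout_data_to_state_probabilities; infer_instance

-- ===== CLAIM (what is proved, stated in full; the proofs are below) =====
def Claim_equal_readout_data_to_state_probabilities : Prop := ∀ (result : List (String × List (List Int))), Dom_readout_data_to_state_probabilities result → Pre_readout_data_to_state_probabilities result → Spec_readout_data_to_state_probabilities result (readout_data_to_state_probabilities result)

-- ===== LEMMAS AND PROOFS =====

/-- Every `q`-th element of a list, starting at its head (the strided slice `l[0::q]`). -/
def everyNth {α : Type} (q : Nat) : List α → List α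
  | [] => []
  | c :: t => c :: everyNth q (t.drop (q - 1))
termination_by l => l.length
decreasing_by simp [List.length_drop]

lemma colA_aux {α : Type} (q : Nat) (hq : 0 < q) (l : List α) :
    ∀ n s, l.length - s ≤ n →
      List.filterMap (fun k => l[(s + q * k)]?) (List.range ((l.length - s + q - 1) / q))
        = everyNth q (l.drop s) := by
  intro n
  induction n with
  | zero =>
    intro s hle
    have hs : l.length ≤ s := by omega
    have hd : l.drop s = [] := List.drop_eq_nil_of_le hs
    have hc : (l.length - s + q - 1) / q = 0 := Nat.div_eq_of_lt (by omega)
    simp [hc, hd, everyNth]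
  | succ n ih =>
    intro s hle
    by_cases hs : l.length ≤ s
    · have hd : l.drop s = [] := List.drop_eq_nil_of_le hs
      have hc : (l.length - s + q - 1) / q = 0 := Nat.div_eq_of_lt (by omega)
      simp [hc, hd, everyNth]
    · push Not at hs
      -- count = (l.length - s - 1)/q + 1
      have hc : (l.length - s + q - 1) / q = (l.length - s - 1) / q + 1 := by
        rw [show l.length - s + q - 1 = (l.length - s - 1) + q by omega, Nat.add_div_right _ hq]
      have hc2 : (l.length - (s + q) + q - 1) / q = (l.length - s - 1) / q := by
        by_cases h : s + q ≤ l.length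
        · congr 1; omega
        · push Not at h
          rw [show l.length - (s + q) + q - 1 = q - 1 by omega, Nat.div_eq_of_lt (by omega),
            Nat.div_eq_of_lt (by omega)]
      have hdrop : l.drop s = l[s] :: l.drop (s + 1) := List.drop_eq_getElem_cons hs
      have hstep : everyNth q (l.drop s) = l[s] :: everyNth q (l.drop (s + q)) := by
        rw [hdrop, everyNth, List.drop_drop, show s + 1 + (q - 1) = s + q by omega]
      rw [hc, List.range_succ_eq_map, List.filterMap_cons, hstep]
      simp only [Nat.mul_zero, Nat.add_zero, List.getElem?_eq_getElem hs]
      rw [List.filterMap_map]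
      have hfeq : List.filterMap ((fun k => l[(s + q * k)]?) ∘ Nat.succ) (List.range ((l.length - s - 1) / q))
          = List.filterMap (fun k => l[(s + q + q * k)]?) (List.range ((l.length - s - 1) / q)) := by
        apply List.filterMap_congr
        intro k _
        simp only [Function.comp]
        simp only [Nat.succ_eq_add_one, Nat.mul_succ]
        congr 1
        omega
      rw [hfeq, ← hc2]
      exact congrArg _ (ih (s + q) (by omega))

lemma slice?_strided (l : List Char) (q idx : Nat) (hq : 0 < q) :
    PySem.List.slice? l (some (idx : Int)) (some (l.length : Int)) (q : Int)
      = some (everyNth q (l.drop idx)) := by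
  have hq0 : (q : Int) ≠ 0 := by exact_mod_cast hq.ne'
  have hqneg : ¬ ((q : Int) < 0) := by omega
  rw [PySem.List.slice?]
  simp only [if_neg hq0, PySem.List.sliceIndices, if_neg hqneg]
  have hidx : ¬ ((idx : Int) < 0) := by omega
  have hlen : ¬ ((l.length : Int) < 0) := by omega
  have hq' : (0 : Int) < (q : Int) := by exact_mod_cast hq
  simp only [if_neg hidx, if_neg hlen, if_pos hq', min_self, ← Nat.cast_min, Nat.cast_lt]
  set m := min idx l.length with hm
  have hmle : m ≤ l.length := min_le_right _ _
  have harg : List.filterMap (fun x : Nat => l[((m : Int) + (q : Int) * (x : Int)).toNat]?) =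
      List.filterMap (fun x : Nat => l[(m + q * x)]?) := by
    funext xs
    apply List.filterMap_congr
    intro x _
    rw [show ((m : Int) + (q : Int) * (x : Int)) = ((m + q * x : Nat) : Int) by push_cast; ring,
      Int.toNat_natCast]
  by_cases hlt : m < l.length
  · rw [if_pos hlt]
    have hnum : ((l.length : Int) - (m : Int) + (q : Int) - 1) = ((l.length - m + q - 1 : Nat) : Int) := by
      omega
    rw [hnum, ← Int.natCast_ediv, Int.toNat_natCast, harg,
      colA_aux q hq l l.length m (by omega)]
    have hidxlen : idx < l.length := by omega
    rw [show m = idx by omega]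
  · rw [if_neg hlt]
    have hidxge : l.length ≤ idx := by omega
    rw [List.range_zero, List.filterMap_nil, List.drop_eq_nil_of_le hidxge, everyNth]

lemma everyNth_append_singleton {α : Type} (q : Nat) (hq : 0 < q) (d : List α) (c : α) :
    everyNth q (d ++ [c])
      = if d.length % q = 0 then everyNth q d ++ [c] else everyNth q d := by
  suffices H : ∀ n (d : List α), d.length ≤ n →
      everyNth q (d ++ [c]) = if d.length % q = 0 then everyNth q d ++ [c] else everyNth q d from
    H d.length d le_rfl
  intro n
  induction n with
  | zero =>
    intro d hd
    have : d = [] := List.eq_nil_of_length_eq_zero (by omega)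
    subst this
    simp [everyNth]
  | succ n ih =>
    intro d hd
    match d with
    | [] => simp [everyNth]
    | a :: t =>
      rw [List.cons_append, everyNth, everyNth]
      by_cases hlen : q - 1 ≤ t.length
      · rw [List.drop_append_of_le_length hlen, ih _ (by simp only [List.length_drop]; simp only [List.length_cons] at hd; omega)]
        have hmod : (a :: t).length % q = (t.drop (q - 1)).length % q := by
          simp only [List.length_cons, List.length_drop]
          rw [show t.length + 1 = (t.length - (q - 1)) + q by omega, Nat.add_mod_right]
        rw [hmod]
        split <;> simp
      · push Not at hlen
        have h1 : (t ++ [c]).length ≤ q - 1 := by simp; omega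
        have h2 : t.length ≤ q - 1 := by omega
        rw [List.drop_eq_nil_of_le h1, List.drop_eq_nil_of_le h2]
        have : (a :: t).length % q ≠ 0 := by
          rw [Nat.mod_eq_of_lt (by simp; omega)]
          simp
        rw [if_neg this]

lemma mod_sub_zero_iff (n i q : Nat) (_hq : 0 < q) (hiq : i < q) (hin : i ≤ n) :
    (n - i) % q = 0 ↔ n % q = i := by
  constructor
  · intro h
    have : n = (n - i) + i := by omega
    rw [this, Nat.add_mod, h, Nat.zero_add, Nat.mod_mod_of_dvd, Nat.mod_eq_of_lt hiq]
    exact dvd_refl q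
  · intro h
    have hdvd : q ∣ n - i := by
      rw [← Nat.modEq_iff_dvd' hin]
      show i % q = n % q
      rw [h, Nat.mod_eq_of_lt hiq]
    obtain ⟨k, hk⟩ := hdvd
    rw [hk, Nat.mul_mod_right]

lemma scatter_fold (q : Nat) (hq : 0 < q) (l : List Char) :
    List.foldl
      (fun (st : List (List Bool) × Nat) ch =>
        (st.1.modify (st.2 % q) (fun col => col ++ [ch == '1']), st.2 + 1))
      (List.replicate q [], 0) l
    = ((List.range q).map (fun idx => (everyNth q (l.drop idx)).map (fun c => c == '1')), l.length) := by
  induction l using List.reverseRecOn with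
  | nil =>
    simp only [List.foldl_nil, List.drop_nil, List.length_nil]
    rw [everyNth]
    ext1
    · apply List.ext_getElem?
      intro i
      simp [List.getElem?_replicate]
    · rfl
  | append_singleton l c ih =>
    rw [List.foldl_append, ih, List.foldl_cons, List.foldl_nil, List.length_append]
    simp only [List.length_cons, List.length_nil]
    refine Prod.ext ?_ (by simp)
    show ((List.range q).map _).modify (l.length % q) _ = _
    apply List.ext_getElem?
    intro i
    rw [List.getElem?_modify]
    by_cases hi : i < q
    · rw [List.getElem?_map, List.getElem?_range hi, List.getElem?_map, List.getElem?_range hi]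
      simp only [Option.map_some]
      by_cases hin : i ≤ l.length
      · rw [List.drop_append_of_le_length hin,
          everyNth_append_singleton q hq (l.drop i) c, List.length_drop]
        simp only [mod_sub_zero_iff l.length i q hq hi hin]
        by_cases hmod : l.length % q = i
        · simp [hmod]
        · simp [hmod]
      · push Not at hin
        have h1 : (l ++ [c]).length ≤ i := by simp; omega
        have h2 : l.length ≤ i := by omega
        rw [List.drop_eq_nil_of_le h1, List.drop_eq_nil_of_le h2]
        have hne : l.length % q ≠ i := by have := Nat.mod_le l.length q; omega
        simp [hne, everyNth]
    · rw [List.getElem?_map, List.getElem?_map]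
      have : (List.range q)[i]? = none := by
        rw [List.getElem?_eq_none_iff]; simpa using hi
      rw [this]
      rfl

lemma b_fold_flatten {β : Type} (f : β → Char → β) (init : β) (rows : List (List Int)) :
    List.foldl (fun acc state => List.foldl (fun acc2 s => List.foldl f acc2 (PySem.Int.toChars s)) acc state) init rows
    = List.foldl f init ((rows.map (fun state => (state.map (fun s => PySem.Int.toChars s)).flatten)).flatten) := by
  rw [List.foldl_flatten, List.foldl_map]
  induction rows generalizing init with
  | nil => rfl
  | cons r rs ih =>
    simp only [List.foldl_cons]
    rw [List.foldl_flatten, List.foldl_map]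
    exact ih _

-- ===== VERDICT (by name: the statement is the Claim_ definition above) =====
theorem readout_data_to_state_probabilities_spec : Claim_equal_readout_data_to_state_probabilities := by
  intro result _ _
  unfold Spec_readout_data_to_state_probabilities
  unfold readout_data_to_state_probabilities readout_data_to_state_probabilities_alt
  cases hget : PySem.Dict.get? (PySem.Dict.mk result) "samples" with
  | none => rfl
  | some state01 =>
    cases hfirst : PySem.List.pyGet? state01 0 with
    | none => simp only [hfirst]
    | some first =>
      simp only [hfirst, PySem.List.slice_from_one]
      by_cases hq : first.length = 0
      · rw [if_pos hq, hq]
        simp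
      · have hq' : 0 < first.length := Nat.pos_of_ne_zero hq
        rw [if_neg hq, PySem.List.pyRange_zero_natCast,
          PySem.List.foldl_append_singleton_eq_map, List.nil_append, List.map_map,
          b_fold_flatten, scatter_fold first.length hq']
        apply List.map_congr_left
        intro idx hidx
        simp only [Function.comp_apply]
        rw [slice?_strided _ first.length idx hq']
        apply List.map_congr_left
        intro c _
        by_cases hc : c = '1' <;> simp [hc]
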